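-- pv_equiv track=rewrite | github.com/facebookresearch/spreadingvectors | lattices/Zn_lattice.py | sum_of_sq
-- ===== SOURCE A (Python) =====
-- def sum_of_sq(total, v, n):
--     """find all positive integer vectors of size n:
--     - whose squared elements sum to total
--     - maximium value is v
--     """
--
--     if total < 0:
--         return []
--     elif total == 0:
--         return [[0] * n]
--     elif n == 1:
--         while v * v > total:
--             v -= 1
--         if v * v == total:
--             return [[v]]
--         else:
--             return []
--     else:
--         res = []
--         for vi in range(v, -1, -1):
--             res += [[vi] + vv for vv in
--                     sum_of_sq(total - vi * vi, vi, n - 1)]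
--         return res
-- ===== SOURCE B (Python) =====
-- def sum_of_sq(total, v, n):
--     """find all positive integer vectors of size n:
--     - whose squared elements sum to total
--     - maximium value is v
--     """
--     # breadth-first: a frontier of partial states (prefix, remaining, max_value, done)
--     # is expanded one coordinate per round; a state whose remainder hits 0 is finished
--     # in place (zero-padded), dead branches are dropped, and the loop stops early
--     # once no live state is left.
--     frontier = [([], total, max(v, 0), False)]
--     for i in range(n):
--         nxt = []
--         live = False
--         for prefix, rem, mv, done in frontier:
--             if done:
--                 nxt.append((prefix, rem, mv, True))
--             elif rem == 0:
--                 nxt.append((prefix + [0] * (n - i), rem, mv, True))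
--             elif rem > 0:
--                 for vi in range(mv, 0, -1):
--                     r2 = rem - vi * vi
--                     if r2 >= 0:
--                         nxt.append((prefix + [vi], r2, vi, False))
--                         live = True
--         frontier = nxt
--         if not live:
--             break
--     return [prefix for prefix, rem, _, done in frontier if done or rem == 0]
-- ===== Notes on version B (the rewrite author's own statement) =====
-- stated objective: alternative
-- what changed: Replaces A's branching recursion (with special n==1 while-loop and total==0 cases) by an iterative breadth-first expansion: a frontier of partial states (prefix, remaining, max_value, done) is expanded one coordinate per round, finished vectors are zero-padded in place, zero/dead branches are pruned, and the loop stops once no live state remains; emission order equals A's DFS order.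
-- intended difference: For n=1 with v<0 and v*v==total>0, A's decrement loop stops immediately and returns [[v]] with a negative entry; B returns [], the intended value for an enumeration of nonnegative integer vectors whose entries elsewhere always range over 0..v. — e.g. on sum_of_sq(1, -1, 1): A returns [[-1]], B returns []
import Mathlib
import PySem

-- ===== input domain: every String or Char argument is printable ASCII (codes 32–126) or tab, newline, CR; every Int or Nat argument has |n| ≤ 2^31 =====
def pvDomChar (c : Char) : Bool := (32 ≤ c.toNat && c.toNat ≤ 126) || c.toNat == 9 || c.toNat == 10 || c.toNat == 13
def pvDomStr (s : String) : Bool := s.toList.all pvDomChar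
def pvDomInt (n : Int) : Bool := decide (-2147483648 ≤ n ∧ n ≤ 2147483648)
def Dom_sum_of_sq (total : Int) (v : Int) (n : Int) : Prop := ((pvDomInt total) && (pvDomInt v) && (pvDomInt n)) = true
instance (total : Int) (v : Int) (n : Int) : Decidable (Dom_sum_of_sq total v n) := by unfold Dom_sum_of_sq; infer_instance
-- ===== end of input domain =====

-- ===== PORT A =====
-- B is an iterative breadth-first (level-by-level) expansion of partial vectors; A is a
-- branching recursion with special cases.  Equivalence is about return values (A mutates nothing).
-- 'while v*v > total: v -= 1' with fuel; on Pre_ (0 ≤ v, 0 < total) fuel v.toNat+1 suffices,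
-- outside Pre_ the Python loop does not terminate.
def pyWhileDec (fuel : Nat) (v total : Int) : Int :=
  match fuel with
  | 0 => v
  | f+1 => if v * v > total then pyWhileDec f (v - 1) total else v

-- fuel bounds the recursion depth (n decreases by 1 per level); on Pre_ fuel n.toNat+1 suffices,
-- outside Pre_ the Python recursion does not terminate.
def sumSqA : Nat → Int → Int → Int → List (List Int)
  | 0, _, _, _ => []
  | fuel+1, total, v, n =>
    if total < 0 then []
    else if total = 0 then [List.replicate n.toNat 0]  -- [0]*n; empty for n ≤ 0 exactly as in Python
    else if n = 1 then
      let w := pyWhileDec (v.toNat + 1) v total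
      if w * w = total then [[w]] else []
    else
      (PySem.List.pyRange v (-1) (-1)).foldl
        (fun res vi => res ++ (sumSqA fuel (total - vi * vi) vi (n - 1)).map (fun vv => vi :: vv)) []

def sum_of_sq (total : Int) (v : Int) (n : Int) : List (List Int) :=
  sumSqA (n.toNat + 1) total v n

-- ===== PORT B =====
-- one round: expand every state (prefix, rem, mv, done); finished states are zero-padded in
-- place, dead branches are dropped; the Bool result is the 'live' flag
def bRound (n i : Int) (fr : List (List Int × Int × Int × Bool)) :
    List (List Int × Int × Int × Bool) × Bool :=
  fr.foldl (fun acc s =>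
    if s.2.2.2 then (acc.1 ++ [(s.1, s.2.1, s.2.2.1, true)], acc.2)
    else if s.2.1 = 0 then
      (acc.1 ++ [(s.1 ++ List.replicate (n - i).toNat 0, s.2.1, s.2.2.1, true)], acc.2)
    else if 0 < s.2.1 then
      (PySem.List.pyRange s.2.2.1 0 (-1)).foldl (fun acc vi =>
        if 0 ≤ s.2.1 - vi * vi then
          (acc.1 ++ [(s.1 ++ [vi], s.2.1 - vi * vi, vi, false)], true)
        else acc) acc
    else acc)
  ([], false)

-- the counted 'for i in range(n): ... if not live: break' loop, as recursion on the
-- remaining round count (the flag is 'stopped'; once set, the loop exits)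
def bLoop (n : Int) : Nat → Int → (List (List Int × Int × Int × Bool) × Bool) →
    (List (List Int × Int × Int × Bool) × Bool)
  | 0, _, acc => acc
  | k+1, i, acc =>
    if acc.2 then acc
    else
      let st := bRound n i acc.1
      bLoop n k (i + 1) (st.1, !st.2)

def sum_of_sq_alt (total : Int) (v : Int) (n : Int) : List (List Int) :=
  let fin := bLoop n n.toNat 0 ([([], total, max v 0, false)], false)
  (fin.1.filter (fun s => s.2.2.2 || s.2.1 == 0)).map (fun s => s.1)

-- ===== PRECONDITION & SPEC =====
-- Pre_ excludes exactly the inputs on which Python A never returns (infinite recursion for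
-- total > 0 with n ≤ 0 and 0 ≤ v; infinite 'while' loop for total > 0, n = 1, v < 0, v*v > total).
def Pre_sum_of_sq (total : Int) (v : Int) (n : Int) : Prop :=
  ¬ (0 < total ∧ ((n ≤ 0 ∧ 0 ≤ v) ∨ (n = 1 ∧ v < 0 ∧ total < v * v)))
instance (total : Int) (v : Int) (n : Int) : Decidable (Pre_sum_of_sq total v n) := by
  unfold Pre_sum_of_sq; infer_instance
def pvWitness_sum_of_sq : Int × Int × Int := (5, 2, 3)

-- For n = 1 with v < 0 and v*v = total > 0, A's decrement loop stops immediately and returns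
-- [[v]] with a negative entry; B returns [], the intended value for an enumeration of
-- nonnegative ("positive integer") vectors whose values elsewhere always range over 0..v.
def D_sum_of_sq (total : Int) (v : Int) (n : Int) : Prop :=
  0 < total ∧ n = 1 ∧ v < 0 ∧ v * v = total
instance (total : Int) (v : Int) (n : Int) : Decidable (D_sum_of_sq total v n) := by
  unfold D_sum_of_sq; infer_instance

def Spec_sum_of_sq (total : Int) (v : Int) (n : Int) (out : List (List Int)) : Prop :=
  ¬ D_sum_of_sq total v n → out = sum_of_sq_alt total v n
instance (total : Int) (v : Int) (n : Int) (out : List (List Int)) : Decidable (Spec_sum_of_sq total v n out) := by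
  unfold Spec_sum_of_sq; infer_instance

def pvDiffWitness_sum_of_sq : Int × Int × Int := (1, -1, 1)
def pvDiffWitnessOut_sum_of_sq : (List (List Int)) × (List (List Int)) := ([[-1]], [])

-- ===== CLAIM (what is proved, stated in full; the proofs are below) =====
def Claim_unchanged_sum_of_sq : Prop := ∀ (total : Int) (v : Int) (n : Int), Dom_sum_of_sq total v n → Pre_sum_of_sq total v n → Spec_sum_of_sq total v n (sum_of_sq total v n)
def Claim_changed_sum_of_sq : Prop := Dom_sum_of_sq (pvDiffWitness_sum_of_sq.1) (pvDiffWitness_sum_of_sq.2.1) (pvDiffWitness_sum_of_sq.2.2) ∧ Pre_sum_of_sq (pvDiffWitness_sum_of_sq.1) (pvDiffWitness_sum_of_sq.2.1) (pvDiffWitness_sum_of_sq.2.2) ∧ D_sum_of_sq (pvDiffWitness_sum_of_sq.1) (pvDiffWitness_sum_of_sq.2.1) (pvDiffWitness_sum_of_sq.2.2) ∧ sum_of_sq (pvDiffWitness_sum_of_sq.1) (pvDiffWitness_sum_of_sq.2.1) (pvDiffWitness_sum_of_sq.2.2) = pvDiffWitnessOut_sum_of_sq.1 ∧ sum_of_sq_alt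 (pvDiffWitness_sum_of_sq.1) (pvDiffWitness_sum_of_sq.2.1) (pvDiffWitness_sum_of_sq.2.2) = pvDiffWitnessOut_sum_of_sq.2 ∧ pvDiffWitnessOut_sum_of_sq.1 ≠ pvDiffWitnessOut_sum_of_sq.2
def Claim_exact_sum_of_sq : Prop := ∀ (total : Int) (v : Int) (n : Int), Dom_sum_of_sq total v n → Pre_sum_of_sq total v n → D_sum_of_sq total v n → sum_of_sq total v n ≠ sum_of_sq_alt total v n

-- ===== LEMMAS AND PROOFS =====

-- canonical enumerator: all length-k continuations of a state (rem, mv), in A's emission order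
def E : Nat → Int → Int → List (List Int)
  | 0, t, _ => if t = 0 then [[]] else []
  | k+1, t, m =>
    (PySem.List.pyRange m (-1) (-1)).flatMap
      (fun vi => if 0 ≤ t - vi * vi then (E k (t - vi * vi) vi).map (fun l => vi :: l) else [])

theorem E_neg (k : Nat) (t m : Int) (ht : t < 0) : E k t m = [] := by
  cases k with
  | zero => simp [E, show t ≠ 0 by omega]
  | succ k =>
    simp only [E]
    rw [List.flatMap_eq_nil_iff.mpr]
    intro vi _
    have h : ¬ (0 ≤ t - vi * vi) := by nlinarith [mul_self_nonneg vi]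
    rw [if_neg h]

theorem E_pos_zero (k : Nat) (t : Int) (ht : 0 < t) : E k t 0 = [] := by
  induction k with
  | zero => simp [E, show t ≠ 0 by omega]
  | succ k ih =>
    simp only [E]
    rw [PySem.List.pyRange_neg_one_cons (by norm_num), PySem.List.pyRange_neg_one_eq_nil (by norm_num)]
    simp [ih]

theorem flat_zero {β : Type} (g : Int → List β) :
    ∀ (j : Nat) (m : Int), m = (j : Int) →
      (PySem.List.pyRange m (-1) (-1)).flatMap
        (fun vi => if 0 ≤ (0:Int) - vi * vi then g vi else []) = g 0 := by
  intro j
  induction j with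
  | zero =>
    intro m hm; subst hm
    rw [PySem.List.pyRange_neg_one_cons (by norm_num), PySem.List.pyRange_neg_one_eq_nil (by norm_num)]
    simp
  | succ j ih =>
    intro m hm; subst hm
    rw [PySem.List.pyRange_neg_one_cons (by exact_mod_cast by omega)]
    have hpos : (0:Int) < (j+1 : Nat) := by exact_mod_cast Nat.succ_pos j
    have : ¬ (0 ≤ (0:Int) - ((j+1 : Nat) : Int) * ((j+1 : Nat) : Int)) := by nlinarith
    simp only [List.flatMap_cons, this, if_false, List.nil_append]
    have := ih (((j+1:Nat):Int) - 1) (by push_cast; ring)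
    simpa using this

theorem E_zero (k : Nat) : ∀ (m : Int), 0 ≤ m → E k 0 m = [List.replicate k 0] := by
  induction k with
  | zero => intro m _; simp [E]
  | succ k ih =>
    intro m hm
    simp only [E]
    rw [flat_zero _ m.toNat m (by omega)]
    simp [ih 0 le_rfl, List.replicate_succ]

-- pyWhileDec from v finds the largest w ≤ v with w*w ≤ total (for 0 ≤ v, 0 < total)
theorem pyWhileDec_spec : ∀ (fuel : Nat) (v t : Int), 0 ≤ v → v.toNat < fuel → 0 < t →
    0 ≤ pyWhileDec fuel v t ∧ pyWhileDec fuel v t ≤ v ∧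
    pyWhileDec fuel v t * pyWhileDec fuel v t ≤ t ∧
    (∀ u, pyWhileDec fuel v t < u → u ≤ v → t < u * u) := by
  intro fuel
  induction fuel with
  | zero => intro v t _ h _; omega
  | succ f ih =>
    intro v t hv hf ht
    simp only [pyWhileDec]
    by_cases hgt : v * v > t
    · have hv1 : 1 ≤ v := by
        rcases lt_or_ge v 1 with h | h
        · interval_cases v; omega
        · exact h
      have hrec := ih (v - 1) t (by omega) (by omega) ht
      rw [if_pos hgt]
      refine ⟨hrec.1, by omega, hrec.2.2.1, ?_⟩
      intro u hu huv
      rcases lt_or_ge u v with h | h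
      · exact hrec.2.2.2 u hu (by omega)
      · have : u = v := by omega
        subst this; omega
    · rw [if_neg hgt]
      exact ⟨hv, le_rfl, by omega, by intro u h1 h2; omega⟩

theorem flatMap_single {β : Type} (h : Int → List β) :
    ∀ (l : List Int) (w : Int), w ∈ l → l.Nodup → (∀ x ∈ l, x ≠ w → h x = []) →
      l.flatMap h = h w := by
  intro l
  induction l with
  | nil => intro w hw; simp at hw
  | cons a l ih =>
    intro w hw hnd hother
    simp only [List.flatMap_cons]
    by_cases haw : a = w
    · subst haw
      have : l.flatMap h = [] := by
        rw [List.flatMap_eq_nil_iff]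
        intro x hx
        exact hother x (List.mem_cons_of_mem _ hx) (by
          intro hxa; subst hxa; exact (List.nodup_cons.mp hnd).1 hx)
      simp [this]
    · have hwl : w ∈ l := by
        rcases List.mem_cons.mp hw with h1 | h1
        · exact absurd h1.symm haw
        · exact h1
      rw [hother a List.mem_cons_self haw,
        ih w hwl (List.nodup_cons.mp hnd).2 (fun x hx => hother x (List.mem_cons_of_mem _ hx))]
      rfl

theorem nodup_pyRange_neg_one (a b : Int) : (PySem.List.pyRange a b (-1)).Nodup := by
  rw [PySem.List.pyRange_neg_one_eq_reverse]
  exact List.nodup_reverse.mpr (PySem.List.nodup_pyRange_one _ _)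

-- E at length 1 = the single [w] decided by the decrement loop
theorem E_one_abs (t m w : Int) (hw0 : 0 ≤ w) (hwm : w ≤ m)
    (hwle : w * w ≤ t) (hwmax : ∀ u, w < u → u ≤ m → t < u * u) :
    E 1 t m = (if w * w = t then [[w]] else []) := by
  have hE : E 1 t m = (PySem.List.pyRange m (-1) (-1)).flatMap
      (fun vi => if vi * vi = t then [[vi]] else []) := by
    simp only [E]
    apply List.flatMap_congr
    intro vi _
    by_cases h2 : vi * vi = t
    · rw [if_pos (by omega : (0:Int) ≤ t - vi * vi), if_pos h2,
        if_pos (by omega : t - vi * vi = 0)]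
      rfl
    · rw [if_neg h2]
      by_cases h1 : (0:Int) ≤ t - vi * vi
      · rw [if_pos h1, if_neg (by omega : ¬ t - vi * vi = 0)]
        rfl
      · rw [if_neg h1]
  rw [hE]
  by_cases hsq : w * w = t
  · rw [if_pos hsq]
    rw [flatMap_single _ _ w (by rw [PySem.List.mem_pyRange_neg_one]; omega)
      (nodup_pyRange_neg_one _ _) ?_]
    · rw [if_pos hsq]
    · intro x hx hxw
      rw [PySem.List.mem_pyRange_neg_one] at hx
      rw [if_neg]
      rcases lt_or_ge w x with h | h
      · have := hwmax x h (by omega); omega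
      · have hxlt : x < w := by omega
        have : x * x < w * w := by nlinarith
        omega
  · rw [if_neg hsq]
    rw [List.flatMap_eq_nil_iff]
    intro x hx
    rw [PySem.List.mem_pyRange_neg_one] at hx
    rw [if_neg]
    intro hxx
    rcases lt_or_ge w x with h | h
    · have := hwmax x h (by omega); omega
    · rcases eq_or_lt_of_le h with h1 | h1
      · subst h1; omega
      · have : x * x < w * w := by nlinarith
        omega

theorem E_one (t m : Int) (hm : 0 ≤ m) (ht : 0 < t) :
    E 1 t m = (if pyWhileDec (m.toNat + 1) m t * pyWhileDec (m.toNat + 1) m t = t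
               then [[pyWhileDec (m.toNat + 1) m t]] else []) := by
  obtain ⟨hw0, hwm, hwle, hwmax⟩ := pyWhileDec_spec (m.toNat + 1) m t hm (by omega) ht
  exact E_one_abs t m _ hw0 hwm hwle hwmax

theorem sumSqA_neg (fuel : Nat) (t v n : Int) (ht : t < 0) : sumSqA fuel t v n = [] := by
  cases fuel with
  | zero => rfl
  | succ f => simp [sumSqA, ht]

-- main A-side lemma: for n ≥ 1, v ≥ 0 and sufficient fuel, A computes E
theorem sumSqA_eq_E : ∀ (k : Nat), 1 ≤ k → ∀ (fuel : Nat) (t m : Int), k ≤ fuel → 0 ≤ m →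
    sumSqA fuel t m (k : Int) = E k t m := by
  intro k
  induction k with
  | zero => omega
  | succ k ih =>
    intro _ fuel t m hfuel hm
    obtain ⟨f, rfl⟩ : ∃ f, fuel = f + 1 := ⟨fuel - 1, by omega⟩
    rcases lt_trichotomy t 0 with ht | ht | ht
    · rw [sumSqA_neg _ _ _ _ ht, E_neg _ _ _ ht]
    · subst ht
      simp only [sumSqA, lt_irrefl, if_false, if_true]
      rw [E_zero _ m hm]
      norm_num
    · cases k with
      | zero =>
        -- n = 1: the while-loop branch
        simp only [sumSqA, if_neg (by omega : ¬ (t < 0)), if_neg (by omega : t ≠ 0)]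
        rw [if_pos (show ((0 + 1 : Nat) : Int) = 1 by norm_num), E_one t m hm ht]
      | succ j =>
        -- n ≥ 2: the recursive branch
        have hn1 : ((j + 1 + 1 : Nat) : Int) ≠ 1 := by push_cast; omega
        simp only [sumSqA, if_neg (by omega : ¬ (t < 0)), if_neg (by omega : t ≠ 0), if_neg hn1]
        rw [PySem.List.foldl_append_eq_flatMap, List.nil_append]
        conv_rhs => rw [E]
        apply List.flatMap_congr
        intro vi hvi
        rw [PySem.List.mem_pyRange_neg_one] at hvi
        have hvi0 : 0 ≤ vi := by omega
        by_cases hr : 0 ≤ t - vi * vi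
        · rw [if_pos hr]
          have : ((j + 1 + 1 : Nat) : Int) - 1 = ((j + 1 : Nat) : Int) := by push_cast; ring
          rw [this, ih (by omega) f (t - vi * vi) vi (by omega) hvi0]
        · rw [if_neg hr, sumSqA_neg _ _ _ _ (by omega)]
          rfl

-- B-side proof layer
def child2 (n i : Int) (s : List Int × Int × Int × Bool) : List (List Int × Int × Int × Bool) :=
  if s.2.2.2 then [(s.1, s.2.1, s.2.2.1, true)]
  else if s.2.1 = 0 then [(s.1 ++ List.replicate (n - i).toNat 0, s.2.1, s.2.2.1, true)]
  else if 0 < s.2.1 then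
    (PySem.List.pyRange s.2.2.1 0 (-1)).flatMap (fun vi =>
      if 0 ≤ s.2.1 - vi * vi then [(s.1 ++ [vi], s.2.1 - vi * vi, vi, false)] else [])
  else []

theorem vi_foldl_fst (rem : Int) (mk : Int → List Int × Int × Int × Bool) :
    ∀ (l : List Int) (acc : List (List Int × Int × Int × Bool) × Bool),
      (l.foldl (fun acc vi =>
          if 0 ≤ rem - vi * vi then (acc.1 ++ [mk vi], true) else acc) acc).1
        = acc.1 ++ l.flatMap (fun vi => if 0 ≤ rem - vi * vi then [mk vi] else []) := by
  intro l
  induction l with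
  | nil => intro acc; simp
  | cons a l ih =>
    intro acc
    simp only [List.foldl_cons, List.flatMap_cons]
    by_cases h : 0 ≤ rem - a * a
    · rw [if_pos h, if_pos h, ih, List.append_assoc]
    · rw [if_neg h, if_neg h, ih]
      rfl

theorem vi_foldl_snd_mono (rem : Int) (mk : Int → List Int × Int × Int × Bool) :
    ∀ (l : List Int) (acc : List (List Int × Int × Int × Bool) × Bool), acc.2 = true →
      (l.foldl (fun acc vi =>
          if 0 ≤ rem - vi * vi then (acc.1 ++ [mk vi], true) else acc) acc).2 = true := by
  intro l
  induction l with
  | nil => intro acc h; exact h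
  | cons a l ih =>
    intro acc h
    simp only [List.foldl_cons]
    by_cases hc : 0 ≤ rem - a * a
    · rw [if_pos hc]; exact ih _ rfl
    · rw [if_neg hc]; exact ih _ h

theorem vi_foldl_snd_false (rem : Int) (mk : Int → List Int × Int × Int × Bool) :
    ∀ (l : List Int) (acc : List (List Int × Int × Int × Bool) × Bool),
      (l.foldl (fun acc vi =>
          if 0 ≤ rem - vi * vi then (acc.1 ++ [mk vi], true) else acc) acc).2 = false →
      acc.2 = false ∧ l.flatMap (fun vi => if 0 ≤ rem - vi * vi then [mk vi] else []) = [] := by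
  intro l
  induction l with
  | nil => intro acc h; exact ⟨h, rfl⟩
  | cons a l ih =>
    intro acc h
    simp only [List.foldl_cons] at h
    by_cases hc : 0 ≤ rem - a * a
    · rw [if_pos hc] at h
      rw [vi_foldl_snd_mono rem mk l _ rfl] at h
      cases h
    · rw [if_neg hc] at h
      obtain ⟨h1, h2⟩ := ih acc h
      refine ⟨h1, ?_⟩
      simp only [List.flatMap_cons, if_neg hc, h2]
      rfl

-- a step of bRound's outer fold
theorem bRound_foldl_fst (n i : Int) :
    ∀ (fr : List (List Int × Int × Int × Bool)) (acc : List (List Int × Int × Int × Bool) × Bool),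
      (fr.foldl (fun acc s =>
        if s.2.2.2 then (acc.1 ++ [(s.1, s.2.1, s.2.2.1, true)], acc.2)
        else if s.2.1 = 0 then
          (acc.1 ++ [(s.1 ++ List.replicate (n - i).toNat 0, s.2.1, s.2.2.1, true)], acc.2)
        else if 0 < s.2.1 then
          (PySem.List.pyRange s.2.2.1 0 (-1)).foldl (fun acc vi =>
            if 0 ≤ s.2.1 - vi * vi then
              (acc.1 ++ [(s.1 ++ [vi], s.2.1 - vi * vi, vi, false)], true)
            else acc) acc
        else acc) acc).1
      = acc.1 ++ fr.flatMap (child2 n i) := by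
  intro fr
  induction fr with
  | nil => intro acc; simp
  | cons s fr ih =>
    intro acc
    simp only [List.foldl_cons, List.flatMap_cons]
    by_cases hd : s.2.2.2
    · rw [if_pos hd, ih]
      unfold child2
      rw [if_pos hd, List.append_assoc]
    · rw [if_neg hd]
      by_cases h0 : s.2.1 = 0
      · rw [if_pos h0, ih]
        unfold child2
        rw [if_neg hd, if_pos h0, List.append_assoc]
      · rw [if_neg h0, ih]
        unfold child2
        rw [if_neg hd, if_neg h0]
        by_cases hp : 0 < s.2.1
        · rw [if_pos hp, if_pos hp, vi_foldl_fst, List.append_assoc]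
        · rw [if_neg hp, if_neg hp, List.nil_append]

theorem bRound_fst (n i : Int) (fr : List (List Int × Int × Int × Bool)) :
    (bRound n i fr).1 = fr.flatMap (child2 n i) := by
  unfold bRound
  rw [bRound_foldl_fst]
  rfl

theorem bRound_foldl_snd_false (n i : Int) :
    ∀ (fr : List (List Int × Int × Int × Bool)) (acc : List (List Int × Int × Int × Bool) × Bool),
      (fr.foldl (fun acc s =>
        if s.2.2.2 then (acc.1 ++ [(s.1, s.2.1, s.2.2.1, true)], acc.2)
        else if s.2.1 = 0 then
          (acc.1 ++ [(s.1 ++ List.replicate (n - i).toNat 0, s.2.1, s.2.2.1, true)], acc.2)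
        else if 0 < s.2.1 then
          (PySem.List.pyRange s.2.2.1 0 (-1)).foldl (fun acc vi =>
            if 0 ≤ s.2.1 - vi * vi then
              (acc.1 ++ [(s.1 ++ [vi], s.2.1 - vi * vi, vi, false)], true)
            else acc) acc
        else acc) acc).2 = false →
      ∀ t ∈ fr.flatMap (child2 n i), t.2.2.2 = true := by
  intro fr
  induction fr with
  | nil => intro acc _ t ht; simp at ht
  | cons s fr ih =>
    intro acc h t ht
    simp only [List.foldl_cons] at h
    rw [List.flatMap_cons, List.mem_append] at ht
    by_cases hd : s.2.2.2
    · rw [if_pos hd] at h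
      rcases ht with ht | ht
      · unfold child2 at ht; rw [if_pos hd] at ht
        simp only [List.mem_singleton] at ht; subst ht; rfl
      · exact ih _ h t ht
    · rw [if_neg hd] at h
      by_cases h0 : s.2.1 = 0
      · rw [if_pos h0] at h
        rcases ht with ht | ht
        · unfold child2 at ht; rw [if_neg hd, if_pos h0] at ht
          simp only [List.mem_singleton] at ht; subst ht; rfl
        · exact ih _ h t ht
      · rw [if_neg h0] at h
        by_cases hp : 0 < s.2.1
        swap
        · rw [if_neg hp] at h
          rcases ht with ht | ht
          · unfold child2 at ht
            rw [if_neg hd, if_neg h0, if_neg hp] at ht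
            simp at ht
          · exact ih _ h t ht
        rw [if_pos hp] at h
        -- the vi-loop's flag ended false ⇒ its whole foldl left the pair's flag as it found it;
        -- chase the flag backwards through the remaining fold
        have hflag := h
        -- flag after this state's vi-loop:
        have hmono : ∀ (fr' : List (List Int × Int × Int × Bool)) (acc' : List (List Int × Int × Int × Bool) × Bool), acc'.2 = true →
            (fr'.foldl (fun acc s =>
              if s.2.2.2 then (acc.1 ++ [(s.1, s.2.1, s.2.2.1, true)], acc.2)
              else if s.2.1 = 0 then
                (acc.1 ++ [(s.1 ++ List.replicate (n - i).toNat 0, s.2.1, s.2.2.1, true)], acc.2)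
              else if 0 < s.2.1 then
                (PySem.List.pyRange s.2.2.1 0 (-1)).foldl (fun acc vi =>
                  if 0 ≤ s.2.1 - vi * vi then
                    (acc.1 ++ [(s.1 ++ [vi], s.2.1 - vi * vi, vi, false)], true)
                  else acc) acc
              else acc) acc').2 = true := by
          intro fr'
          induction fr' with
          | nil => intro acc' h'; exact h'
          | cons u fr' ih' =>
            intro acc' h'
            simp only [List.foldl_cons]
            by_cases hud : u.2.2.2
            · rw [if_pos hud]; exact ih' _ h'
            · rw [if_neg hud]
              by_cases hu0 : u.2.1 = 0
              · rw [if_pos hu0]; exact ih' _ h'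
              · rw [if_neg hu0]
                by_cases hup : 0 < u.2.1
                · rw [if_pos hup]
                  exact ih' _ (vi_foldl_snd_mono _ _ _ _ h')
                · rw [if_neg hup]; exact ih' _ h' 
        have hvi : ((PySem.List.pyRange s.2.2.1 0 (-1)).foldl (fun acc vi =>
            if 0 ≤ s.2.1 - vi * vi then
              (acc.1 ++ [(s.1 ++ [vi], s.2.1 - vi * vi, vi, false)], true)
            else acc) acc).2 = false := by
          by_contra hc
          rw [hmono _ _ (by revert hc; cases ((PySem.List.pyRange s.2.2.1 0 (-1)).foldl (fun acc vi =>
            if 0 ≤ s.2.1 - vi * vi then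
              (acc.1 ++ [(s.1 ++ [vi], s.2.1 - vi * vi, vi, false)], true)
            else acc) acc).2 <;> simp)] at hflag
          cases hflag
        obtain ⟨_, hempty⟩ := vi_foldl_snd_false s.2.1 _ _ _ hvi
        rcases ht with ht | ht
        · unfold child2 at ht; rw [if_neg hd, if_neg h0, if_pos hp] at ht
          rw [hempty] at ht
          simp at ht
        · exact ih _ h t ht

theorem bRound_snd_false (n i : Int) (fr : List (List Int × Int × Int × Bool))
    (h : (bRound n i fr).2 = false) : ∀ t ∈ (bRound n i fr).1, t.2.2.2 = true := by
  rw [bRound_fst]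
  exact bRound_foldl_snd_false n i fr ([], false) h

theorem bRound_all_done (n i : Int) (fr : List (List Int × Int × Int × Bool))
    (h : ∀ s ∈ fr, s.2.2.2 = true) : (bRound n i fr).1 = fr := by
  rw [bRound_fst]
  induction fr with
  | nil => rfl
  | cons s fr ih =>
    rw [List.flatMap_cons, ih (fun u hu => h u (List.mem_cons_of_mem _ hu))]
    unfold child2
    rw [if_pos (h s List.mem_cons_self)]
    obtain ⟨p, rem, mv, d⟩ := s
    have : d = true := h (p, rem, mv, d) List.mem_cons_self
    subst this
    rfl

-- the loop with break computes the same frontier as the loop without it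
theorem foldl_full_all_done (n : Int) (fr : List (List Int × Int × Int × Bool))
    (h : ∀ s ∈ fr, s.2.2.2 = true) :
    ∀ (l : List Int), l.foldl (fun fr i => (bRound n i fr).1) fr = fr := by
  intro l
  induction l with
  | nil => rfl
  | cons i l ih => rw [List.foldl_cons, bRound_all_done n i fr h]; exact ih

theorem bLoop_eq (n : Int) : ∀ (k : Nat) (i : Int) (fr : List (List Int × Int × Int × Bool))
    (stopped : Bool), (stopped = true → ∀ s ∈ fr, s.2.2.2 = true) →
    (bLoop n k i (fr, stopped)).1
      = (PySem.List.pyRange i (i + (k : Int)) 1).foldl (fun fr j => (bRound n j fr).1) fr := by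
  intro k
  induction k with
  | zero =>
    intro i fr stopped _
    rw [PySem.List.pyRange_one_eq_nil (by omega), List.foldl_nil]
    cases stopped <;> rfl
  | succ k ih =>
    intro i fr stopped hinv
    rw [PySem.List.pyRange_one_cons (by push_cast; omega), List.foldl_cons]
    cases stopped with
    | true =>
      show fr = _
      rw [bRound_all_done n i fr (hinv rfl), foldl_full_all_done n fr (hinv rfl)]
    | false =>
      show (bLoop n k (i+1) ((bRound n i fr).1, !(bRound n i fr).2)).1 = _
      have harith : i + ((k:Nat)+1:Nat) = (i + 1) + (k:Int) := by push_cast; ring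
      cases hlive : (bRound n i fr).2 with
      | true =>
        have := ih (i+1) (bRound n i fr).1 false (by intro h; cases h)
        show (bLoop n k (i+1) ((bRound n i fr).1, false)).1 = _
        rw [this]
        congr 1
        push_cast
        ring_nf
      | false =>
        have := ih (i+1) (bRound n i fr).1 true (fun _ => bRound_snd_false n i fr hlive)
        show (bLoop n k (i+1) ((bRound n i fr).1, true)).1 = _
        rw [this]
        congr 1
        push_cast
        ring_nf

def extract2 (fr : List (List Int × Int × Int × Bool)) : List (List Int) :=
  (fr.filter (fun s => s.2.2.2 || s.2.1 == 0)).map (fun s => s.1)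

theorem extract2_eq (fr : List (List Int × Int × Int × Bool)) :
    extract2 fr = fr.flatMap (fun s => if s.2.2.2 || s.2.1 = 0 then [s.1] else []) := by
  induction fr with
  | nil => rfl
  | cons s fr ih =>
    simp only [extract2, List.filter_cons, List.flatMap_cons] at ih ⊢
    by_cases h : (s.2.2.2 || s.2.1 == 0) = true
    · rw [if_pos h, List.map_cons, ih, if_pos (by simpa using h)]
      rfl
    · rw [if_neg h, ih, if_neg (by simpa using h)]
      rfl

def bodyE (k : Nat) (s : List Int × Int × Int × Bool) : List (List Int) :=
  if s.2.2.2 then [s.1] else (E k s.2.1 s.2.2.1).map (fun l => s.1 ++ l)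

theorem range_split0 (m : Int) (hm : 0 ≤ m) :
    PySem.List.pyRange m (-1) (-1) = PySem.List.pyRange m 0 (-1) ++ [0] := by
  rw [PySem.List.pyRange_neg_one_eq_reverse, PySem.List.pyRange_neg_one_eq_reverse,
    show (-1 : Int) + 1 = 0 from rfl, show (0 : Int) + 1 = 1 from rfl,
    PySem.List.pyRange_one_append 0 1 (m+1) (by omega) (by omega), List.reverse_append]
  congr 1

theorem run_full (n : Int) :
    ∀ (k : Nat) (i : Int) (fr : List (List Int × Int × Int × Bool)), i + k = n →
      (∀ s ∈ fr, s.2.2.2 = false → 0 ≤ s.2.2.1) →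
      extract2 ((PySem.List.pyRange i n 1).foldl (fun fr j => (bRound n j fr).1) fr)
        = fr.flatMap (bodyE k) := by
  intro k
  induction k with
  | zero =>
    intro i fr hi _
    rw [PySem.List.pyRange_one_eq_nil (by omega), List.foldl_nil, extract2_eq]
    apply List.flatMap_congr
    intro s _
    unfold bodyE
    by_cases hd : s.2.2.2
    · rw [if_pos (by simp [hd]), if_pos hd]
    · by_cases h0 : s.2.1 = 0
      · rw [if_pos (by simp [h0]), if_neg hd, h0, E, if_pos rfl]
        simp
      · rw [if_neg (by simp [hd, h0]), if_neg hd, E, if_neg h0]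
        rfl
  | succ k ih =>
    intro i fr hi hmv
    rw [PySem.List.pyRange_one_cons (by omega), List.foldl_cons]
    rw [ih (i+1) _ (by omega) ?hmv]
    case hmv =>
      intro t ht htd
      rw [bRound_fst] at ht
      obtain ⟨s, hs, hts⟩ := List.mem_flatMap.mp ht
      unfold child2 at hts
      by_cases hd : s.2.2.2
      · rw [if_pos hd] at hts
        simp only [List.mem_singleton] at hts
        subst hts; cases htd
      · rw [if_neg hd] at hts
        by_cases h0 : s.2.1 = 0
        · rw [if_pos h0] at hts
          simp only [List.mem_singleton] at hts
          subst hts; cases htd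
        · rw [if_neg h0] at hts
          by_cases hp : 0 < s.2.1
          swap
          · rw [if_neg hp] at hts; simp at hts
          rw [if_pos hp] at hts
          obtain ⟨vi, hvi, hin⟩ := List.mem_flatMap.mp hts
          rw [PySem.List.mem_pyRange_neg_one] at hvi
          by_cases hc : 0 ≤ s.2.1 - vi * vi
          · rw [if_pos hc] at hin
            simp only [List.mem_singleton] at hin
            subst hin
            show (0:Int) ≤ vi
            omega
          · rw [if_neg hc] at hin; simp at hin
    rw [bRound_fst, List.flatMap_assoc]
    apply List.flatMap_congr
    intro s hs
    unfold child2
    by_cases hd : s.2.2.2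
    · rw [if_pos hd]
      unfold bodyE
      rw [List.flatMap_cons, List.flatMap_nil, List.append_nil, if_pos rfl, if_pos hd]
    · rw [if_neg hd]
      have hmv' : (0:Int) ≤ s.2.2.1 := hmv s hs (by rw [Bool.not_eq_true] at hd; exact hd)
      by_cases h0 : s.2.1 = 0
      · rw [if_pos h0]
        unfold bodyE
        rw [List.flatMap_cons, List.flatMap_nil, List.append_nil, if_pos rfl, if_neg hd,
          h0, E_zero _ _ hmv', show (n - i).toNat = k + 1 by omega]
        rfl
      · unfold bodyE
        rw [if_neg h0, if_neg hd]
        by_cases hp : 0 < s.2.1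
        swap
        · rw [if_neg hp, E_neg _ _ _ (by omega)]
          rfl
        rw [if_pos hp]
        conv_rhs => rw [E]
        rw [range_split0 _ hmv', List.map_flatMap, List.flatMap_append, List.flatMap_assoc]
        have hzero : ([0] : List Int).flatMap (fun vi =>
            (if 0 ≤ s.2.1 - vi * vi then (E k (s.2.1 - vi * vi) vi).map (fun l => vi :: l)
             else []).map (fun l => s.1 ++ l)) = [] := by
          rw [List.flatMap_cons, List.flatMap_nil, List.append_nil]
          by_cases hc : 0 ≤ s.2.1 - 0 * 0
          · rw [if_pos hc]
            rcases lt_or_gt_of_ne h0 with h | h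
            · omega
            · rw [show s.2.1 - 0 * 0 = s.2.1 by ring, E_pos_zero k _ h]
              rfl
          · rw [if_neg hc]
            rfl
        rw [hzero, List.append_nil]
        apply List.flatMap_congr
        intro vi _
        by_cases hc : 0 ≤ s.2.1 - vi * vi
        · rw [if_pos hc, if_pos hc]
          simp only [List.flatMap_cons, List.flatMap_nil, List.append_nil,
            Bool.false_eq_true, if_false, List.map_map]
          apply List.map_congr_left
          intro l _
          simp
        · rw [if_neg hc, if_neg hc]
          rfl

theorem alt_eq_E (t v n : Int) : sum_of_sq_alt t v n = E n.toNat t (max v 0) := by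
  show extract2 ((bLoop n n.toNat 0 ([([], t, max v 0, false)], false)).1) = _
  rw [bLoop_eq n n.toNat 0 _ false (by intro h; cases h)]
  rcases le_or_gt n 0 with hn | hn
  · rw [show n.toNat = 0 by omega]
    rw [PySem.List.pyRange_one_eq_nil (by omega), List.foldl_nil]
    unfold extract2
    by_cases h0 : t = 0
    · simp [h0, E]
    · simp [h0, E, show (t == 0) = false by simpa using h0]
  · rw [show (0:Int) + (n.toNat:Int) = n by omega]
    rw [run_full n n.toNat 0 _ (by omega) (by intro s hs _; simp only [List.mem_singleton] at hs; subst hs; exact le_max_right v 0)]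
    unfold bodyE
    simp only [List.flatMap_cons, List.flatMap_nil, List.append_nil,
      Bool.false_eq_true, if_false]
    simp

-- ===== VERDICT (by name: the statement is the Claim_ definition above) =====
theorem sum_of_sq_spec : Claim_unchanged_sum_of_sq := by
  intro t v n _ hpre hnd
  unfold Pre_sum_of_sq at hpre
  unfold D_sum_of_sq at hnd
  rw [alt_eq_E]
  show sumSqA (n.toNat + 1) t v n = E n.toNat t (max v 0)
  rcases lt_trichotomy t 0 with ht | ht | ht
  · rw [sumSqA_neg _ _ _ _ ht, E_neg _ _ _ ht]
  · subst ht
    simp only [sumSqA, lt_irrefl, if_false, if_true]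
    rw [E_zero _ _ (le_max_right v 0)]
  · rcases le_or_gt n 0 with hn | hn
    · -- total > 0, n ≤ 0: Pre_ forces v < 0, both sides []
      have hv : v < 0 := by
        by_contra hv
        exact hpre ⟨ht, Or.inl ⟨hn, by omega⟩⟩
      have hn0 : n.toNat = 0 := by omega
      rw [hn0]
      simp only [sumSqA, if_neg (by omega : ¬ (t < 0)), if_neg (by omega : t ≠ 0),
        if_neg (by omega : n ≠ 1)]
      rw [PySem.List.pyRange_neg_one_eq_nil (by omega : v ≤ -1)]
      simp [E, show t ≠ 0 by omega]
    · rcases le_or_gt 0 v with hv | hv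
      · -- v ≥ 0: the main lemma
        have hmax : max v 0 = v := by omega
        have hcast : ((n.toNat : Int)) = n := by omega
        rw [hmax]
        have h := sumSqA_eq_E n.toNat (by omega) (n.toNat + 1) t v (by omega) hv
        rw [hcast] at h
        exact h
      · -- v < 0: both sides []
        have hmax : max v 0 = 0 := by omega
        rw [hmax, E_pos_zero _ _ ht]
        by_cases hn1 : n = 1
        · subst hn1
          have hvle : v * v ≤ t := by
            by_contra h
            exact hpre ⟨ht, Or.inr ⟨rfl, hv, by omega⟩⟩
          have hvne : v * v ≠ t := by
            intro h
            exact hnd ⟨ht, rfl, hv, h⟩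
          have hvt : v.toNat = 0 := by omega
          simp only [sumSqA, if_neg (by omega : ¬ (t < 0)), if_neg (by omega : t ≠ 0), hvt]
          simp only [pyWhileDec, if_neg (by omega : ¬ (v * v > t))]
          simp [hvne]
        · simp only [sumSqA, if_neg (by omega : ¬ (t < 0)), if_neg (by omega : t ≠ 0),
            if_neg hn1]
          rw [PySem.List.pyRange_neg_one_eq_nil (by omega : v ≤ -1)]
          rfl

theorem sum_of_sq_changed : Claim_changed_sum_of_sq := by
  unfold Claim_changed_sum_of_sq; decide

theorem sum_of_sq_tight : Claim_exact_sum_of_sq := by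
  intro t v n _ _ hd
  obtain ⟨ht, hn, hv, hsq⟩ := hd
  subst hn
  rw [alt_eq_E]
  have hmax : max v 0 = 0 := by omega
  rw [hmax, show (1:Int).toNat = 1 from rfl, E_pos_zero _ _ ht]
  show sumSqA ((1:Int).toNat + 1) t v 1 ≠ []
  have hvt : v.toNat = 0 := by omega
  simp only [show (1:Int).toNat = 1 from rfl, sumSqA, if_neg (by omega : ¬ (t < 0)),
    if_neg (by omega : t ≠ 0), hvt]
  simp only [pyWhileDec, if_neg (by omega : ¬ (v * v > t))]
  rw [if_pos hsq]
  simp
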